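-- pv_equiv track=rewrite | github.com/friedgulaman/MiGrade | Migrade_v.1.2/CuyabSRMS/TeacherViews.py | sf2_process_row
-- ===== SOURCE A (Python) =====
-- def sf2_process_row(row):
--     # Find the index of the first non-None element after index 0
--     index = 1
--     while index < len(row) and row[index] is None:
--         index += 1
--
--     # # Remove the three None values next to index 0
--     # row = [row[0]] + row[index:]
--
--     # Find the index of the last non-None element
--     last_index = len(row) - 1
--     while last_index >= 0 and row[last_index] is None:
--         last_index -= 1
--
--     # Remove all None values from the end of the list until reaching a non-None value
--     row = row[:last_index + 1]
--
--     return row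
-- ===== SOURCE B (Python) =====
-- def sf2_process_row(row):
--     out = list(row)
--     while out and out[-1] is None:
--         out.pop()
--     return out
-- ===== Notes on version B (the rewrite author's own statement) =====
-- stated objective: simpler
-- what changed: B drops the dead forward scan and replaces the backward index search plus slice with popping trailing None values from a copy of the list.
import Mathlib
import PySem

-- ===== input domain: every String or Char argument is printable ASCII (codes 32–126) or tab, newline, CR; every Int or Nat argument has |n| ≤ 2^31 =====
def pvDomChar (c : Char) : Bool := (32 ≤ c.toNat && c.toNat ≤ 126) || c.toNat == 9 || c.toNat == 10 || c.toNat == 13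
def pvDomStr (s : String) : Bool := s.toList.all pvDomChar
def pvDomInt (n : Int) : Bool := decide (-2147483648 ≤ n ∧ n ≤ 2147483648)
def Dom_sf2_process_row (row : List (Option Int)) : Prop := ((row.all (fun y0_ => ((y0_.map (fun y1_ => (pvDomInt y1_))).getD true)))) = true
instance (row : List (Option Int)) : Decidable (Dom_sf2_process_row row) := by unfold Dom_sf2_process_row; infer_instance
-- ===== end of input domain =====

-- ===== PORT A =====
-- B simplifies A: the dead forward scan is dropped and trailing None values are popped
-- from a copy instead of computing a backward index and slicing (return value only; A mutates no argument).

-- while index < len(row) and row[index] is None: index += 1   (dead loop, result unused)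
def pvFirstLoop (row : List (Option Int)) (i : Nat) : Nat :=
  if h : i < row.length ∧ (row.getD i none).isNone then pvFirstLoop row (i + 1) else i
termination_by row.length - i
decreasing_by have := h.1; omega

-- while last_index >= 0 and row[last_index] is None: last_index -= 1
-- fuel m = last_index + 1; returns the final last_index (−1 when everything is None)
def pvLastLoop (row : List (Option Int)) : Nat → Int
  | 0 => -1
  | i + 1 => if (row.getD i none).isNone then pvLastLoop row i else (i : Int)

def sf2_process_row (row : List (Option Int)) : List (Option Int) :=
  let _index := pvFirstLoop row 1
  let last_index := pvLastLoop row row.length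
  -- row[:last_index + 1] with last_index + 1 ≥ 0 always
  row.take (last_index + 1).toNat

-- ===== PORT B =====
-- while out and out[-1] is None: out.pop()
def pvTrimLoop (l : List (Option Int)) : List (Option Int) :=
  if h : l ≠ [] ∧ (l.getLast?.getD none).isNone then pvTrimLoop l.dropLast else l
termination_by l.length
decreasing_by
  have : 0 < l.length := List.length_pos_iff.mpr h.1
  simp [List.length_dropLast]; omega

def sf2_process_row_alt (row : List (Option Int)) : List (Option Int) :=
  pvTrimLoop row

-- ===== PRECONDITION & SPEC =====
def Spec_sf2_process_row (row : List (Option Int)) (out : List (Option Int)) : Prop := out = sf2_process_row_alt row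
instance (row : List (Option Int)) (out : List (Option Int)) : Decidable (Spec_sf2_process_row row out) := by unfold Spec_sf2_process_row; infer_instance

-- ===== CLAIM (what is proved, stated in full; the proofs are below) =====
def Claim_equal_sf2_process_row : Prop := ∀ (row : List (Option Int)), Dom_sf2_process_row row → Spec_sf2_process_row row (sf2_process_row row)

-- ===== LEMMAS AND PROOFS =====

theorem pvLastLoop_lb (row : List (Option Int)) (m : Nat) : -1 ≤ pvLastLoop row m := by
  induction m with
  | zero => simp [pvLastLoop]
  | succ i ih => simp only [pvLastLoop]; split <;> omega

theorem pvLastLoop_ub (row : List (Option Int)) (m : Nat) : pvLastLoop row m + 1 ≤ (m : Int) := by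
  induction m with
  | zero => simp [pvLastLoop]
  | succ i ih => simp only [pvLastLoop]; split <;> push_cast <;> omega

theorem pvLastLoop_dropLast (l : List (Option Int)) (m : Nat) (hm : m ≤ l.dropLast.length) :
    pvLastLoop l m = pvLastLoop l.dropLast m := by
  induction m with
  | zero => rfl
  | succ i ih =>
    have hi : i < l.dropLast.length := by omega
    have hi' : i < l.length := by simp only [List.length_dropLast] at hi; omega
    have hget : l.dropLast.getD i none = l.getD i none := by
      unfold List.getD
      rw [List.getElem?_eq_getElem hi, List.getElem?_eq_getElem hi']
      simp [List.getElem_dropLast]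
    simp only [pvLastLoop, hget, ih (by omega)]

theorem pv_main : ∀ (n : Nat) (row : List (Option Int)), row.length ≤ n →
    sf2_process_row row = pvTrimLoop row := by
  intro n
  induction n with
  | zero =>
    intro row hr
    have : row = [] := List.eq_nil_of_length_eq_zero (by omega)
    subst this
    rw [pvTrimLoop]
    simp [sf2_process_row, pvLastLoop]
  | succ n ih =>
    intro row hr
    by_cases hne : row = []
    · subst hne
      rw [pvTrimLoop]
      simp [sf2_process_row, pvLastLoop]
    · have hlen : 1 ≤ row.length := List.length_pos_iff.mpr hne
      obtain ⟨k, hk⟩ : ∃ k, row.length = k + 1 := ⟨row.length - 1, by omega⟩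
      have hdl : row.dropLast.length = k := by simp [List.length_dropLast, hk]
      have hlast : row.getLast?.getD none = row.getD k none := by
        rw [List.getLast?_eq_getElem?]
        simp [List.getD, hk]
      by_cases hc : (row.getLast?.getD none).isNone
      · -- last element is None: both sides step to dropLast
        have hkNone : (row.getD k none).isNone := by rw [← hlast]; exact hc
        have hstep : pvLastLoop row row.length = pvLastLoop row.dropLast k := by
          rw [hk]
          simp only [pvLastLoop, hkNone, if_pos]
          rw [pvLastLoop_dropLast row k (by omega)]
        have hub := pvLastLoop_ub row.dropLast k
        have hlb := pvLastLoop_lb row.dropLast k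
        have hA : sf2_process_row row = sf2_process_row row.dropLast := by
          simp only [sf2_process_row, hstep, hdl]
          set m := (pvLastLoop row.dropLast k + 1).toNat with hmdef
          rw [List.dropLast_eq_take, List.take_take]
          congr 1
          rw [hk]
          omega
        have hB : pvTrimLoop row = pvTrimLoop row.dropLast := by
          rw [pvTrimLoop]
          simp [hne, hc]
        rw [hA, hB]
        exact ih row.dropLast (by omega)
      · -- last element is not None: A keeps the whole list, B stops
        have hkSome : ¬ (row.getD k none).isNone := by rw [← hlast]; exact hc
        have hloop : pvLastLoop row row.length = (k : Int) := by
          rw [hk]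
          simp only [pvLastLoop]
          rw [if_neg hkSome]
        have hA : sf2_process_row row = row := by
          simp only [sf2_process_row, hloop]
          have h1 : ((k : Int) + 1).toNat = row.length := by omega
          rw [h1, List.take_length]
        have hB : pvTrimLoop row = row := by
          rw [pvTrimLoop]
          simp [hc]
        rw [hA, hB]

-- ===== VERDICT (by name: the statement is the Claim_ definition above) =====
theorem sf2_process_row_spec : Claim_equal_sf2_process_row := by
  intro row _
  unfold Spec_sf2_process_row sf2_process_row_alt
  exact pv_main row.length row le_rfl
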